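-- pv_equiv track=rewrite | github.com/IPTVRU2026/VPNWHIT33 | scripts/generate_readme.py | format_protocols_badge
-- ===== SOURCE A (Python) =====
-- def format_protocols_badge(protocols: dict) -> str:
--     """Форматирует бейджи протоколов"""
--     if not protocols:
--         return "`Configs: 0`"
--     badges = []
--     priority = ['VLESS', 'VMess', 'Trojan', 'SS', 'Hysteria', 'Other']
--     for proto in priority:
--         if proto in protocols:
--             badges.append(f"`{proto}: {protocols[proto]}`")
--     for proto, count in protocols.items():
--         if proto not in priority:
--             badges.append(f"`{proto}: {count}`")
--     return " ".join(badges)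
-- ===== SOURCE B (Python) =====
-- def format_protocols_badge(protocols: dict) -> str:
--     if not protocols:
--         return "`Configs: 0`"
--     priority = ['VLESS', 'VMess', 'Trojan', 'SS', 'Hysteria', 'Other']
--     buckets = [[] for _ in range(len(priority) + 1)]
--     for proto, count in protocols.items():
--         try:
--             r = priority.index(proto)
--         except ValueError:
--             r = len(priority)
--         buckets[r].append(f"`{proto}: {count}`")
--     return " ".join(badge for bucket in buckets for badge in bucket)
-- ===== Notes on version B (the rewrite author's own statement) =====
-- stated objective: alternative
-- what changed: Replaced A's two passes (a scan over the priority list with a dict membership+lookup per entry, then a second pass over the dict for leftovers) by a single pass over the dict that drops each badge into one of 7 rank buckets (priority.index, or 6 for unknown protocols) and joins the concatenated buckets.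
import Mathlib
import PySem

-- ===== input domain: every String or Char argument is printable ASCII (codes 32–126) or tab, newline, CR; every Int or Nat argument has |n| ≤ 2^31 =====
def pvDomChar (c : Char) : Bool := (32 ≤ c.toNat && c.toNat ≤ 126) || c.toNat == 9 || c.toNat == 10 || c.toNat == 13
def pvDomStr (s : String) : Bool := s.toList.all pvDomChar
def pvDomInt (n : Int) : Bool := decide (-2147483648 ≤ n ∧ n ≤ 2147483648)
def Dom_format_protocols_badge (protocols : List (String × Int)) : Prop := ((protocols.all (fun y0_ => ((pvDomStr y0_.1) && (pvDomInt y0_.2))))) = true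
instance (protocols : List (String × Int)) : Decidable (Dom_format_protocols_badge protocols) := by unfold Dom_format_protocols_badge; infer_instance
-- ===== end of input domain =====

-- B replaces A's two passes (priority scan with dict lookups, then a leftover pass) by one
-- pass over the dict entries into 7 rank buckets; equivalence of the RETURN value is proved.

-- ===== PORT A =====
-- f"`{proto}: {count}`" (string concatenation of printable parts; exact for ASCII strings and ints via PySem.Int.toStr)
def pvFmt (p : String) (c : Int) : String := "`" ++ p ++ ": " ++ PySem.Int.toStr c ++ "`"

def pvPriority : List String := ["VLESS", "VMess", "Trojan", "SS", "Hysteria", "Other"]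

def format_protocols_badge (protocols : List (String × Int)) : String :=
  if protocols.isEmpty then "`Configs: 0`" else
    -- for proto in priority: if proto in protocols: badges.append(...)
    let badges : List String :=
      pvPriority.foldl (fun acc proto =>
        match PySem.Dict.get? (PySem.Dict.mk protocols) proto with
        | some c => acc ++ [pvFmt proto c]
        | none => acc) []
    -- for proto, count in protocols.items(): if proto not in priority: badges.append(...)
    let badges : List String :=
      protocols.foldl (fun acc pc =>
        if !(pvPriority.contains pc.1) then acc ++ [pvFmt pc.1 pc.2] else acc) badges
    PySem.Str.join " " badges

-- ===== PORT B =====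
-- r = priority.index(proto) if proto in priority else len(priority)  (List.idxOf is exactly that)
def pvRank (p : String) : Nat := pvPriority.idxOf p

def format_protocols_badge_alt (protocols : List (String × Int)) : String :=
  if protocols.isEmpty then "`Configs: 0`" else
    let buckets : List (List String) :=
      protocols.foldl (fun bs pc =>
        bs.set (pvRank pc.1) (bs.getD (pvRank pc.1) [] ++ [pvFmt pc.1 pc.2]))
        (List.replicate 7 [])
    PySem.Str.join " " buckets.flatten

-- ===== PRECONDITION & SPEC =====
-- Pre_ excludes association lists with duplicate keys: they do not represent any Python dict
-- (A's parameter is a dict, whose keys are unique), so A's behaviour on them is undefined.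
def Pre_format_protocols_badge (protocols : List (String × Int)) : Prop :=
  (protocols.map Prod.fst).Nodup
instance (protocols : List (String × Int)) : Decidable (Pre_format_protocols_badge protocols) := by unfold Pre_format_protocols_badge; infer_instance

def pvWitness_format_protocols_badge : (List (String × Int)) :=
  [("SS", 3), ("Other", 1), ("Tuic", 2), ("VLESS", 9)]

def Spec_format_protocols_badge (protocols : List (String × Int)) (out : String) : Prop := out = format_protocols_badge_alt protocols
instance (protocols : List (String × Int)) (out : String) : Decidable (Spec_format_protocols_badge protocols out) := by unfold Spec_format_protocols_badge; infer_instance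

-- ===== CLAIM (what is proved, stated in full; the proofs are below) =====
def Claim_equal_format_protocols_badge : Prop := ∀ (protocols : List (String × Int)), Dom_format_protocols_badge protocols → Pre_format_protocols_badge protocols → Spec_format_protocols_badge protocols (format_protocols_badge protocols)

-- ===== LEMMAS AND PROOFS =====

-- the badge list contributed by one looked-up key
def pvOptB (L : List (String × Int)) (k : String) : List String :=
  match PySem.Dict.get? (PySem.Dict.mk L) k with
  | some c => [pvFmt k c]
  | none => []

-- badges of the entries of P that have rank r
def pvG (P : List (String × Int)) (r : Nat) : List String :=
  (P.filter (fun pc => pvRank pc.1 == r)).map (fun pc => pvFmt pc.1 pc.2)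

lemma pvRank_lt (p : String) : pvRank p < 7 := by
  have := List.idxOf_le_length (l := pvPriority) (a := p)
  simp [pvRank, pvPriority] at *; omega

lemma pvRank_eq (p : String) : pvRank p =
    if "VLESS" = p then 0 else if "VMess" = p then 1 else if "Trojan" = p then 2
    else if "SS" = p then 3 else if "Hysteria" = p then 4 else if "Other" = p then 5 else 6 := by
  simp only [pvRank, pvPriority, List.idxOf_cons, List.idxOf_nil, Bool.cond_eq_ite, beq_iff_eq]
  split_ifs <;> simp_all

lemma pvRank_beq_six (x : String) : (pvRank x == 6) = !(pvPriority.contains x) := by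
  rw [pvRank_eq]
  simp only [pvPriority, List.contains_cons, List.contains_nil]
  split_ifs <;> simp_all [@eq_comm String]

-- one step of B's bucket fold, on buckets of the canonical shape
lemma pvStep_eq (P : List (String × Int)) (a : String × Int) :
    (((List.range 7).map (pvG P)).set (pvRank a.1)
        ((((List.range 7).map (pvG P)).getD (pvRank a.1) []) ++ [pvFmt a.1 a.2]))
      = (List.range 7).map (pvG (P ++ [a])) := by
  have hr := pvRank_lt a.1
  have hget : ((List.range 7).map (pvG P)).getD (pvRank a.1) [] = pvG P (pvRank a.1) := by
    simp [List.getD_eq_getElem?_getD, List.getElem?_map, List.getElem?_range hr]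
  rw [hget]
  apply List.ext_getElem
  · simp
  · intro j hj1 hj2
    have hj : j < 7 := by simpa using hj2
    rw [List.getElem_set]
    have hGapp : pvG (P ++ [a]) j
        = pvG P j ++ (if pvRank a.1 == j then [pvFmt a.1 a.2] else []) := by
      simp only [pvG, List.filter_append, List.map_append, List.filter_cons, List.filter_nil]
      split_ifs <;> simp_all
    by_cases hji : pvRank a.1 = j
    · simp [hji, List.getElem_map, List.getElem_range, hGapp]
    · simp [hji, List.getElem_map, List.getElem_range, hGapp]

lemma pvBuckets_go (L : List (String × Int)) : ∀ P : List (String × Int),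
    L.foldl (fun bs pc =>
        bs.set (pvRank pc.1) (bs.getD (pvRank pc.1) [] ++ [pvFmt pc.1 pc.2]))
      ((List.range 7).map (pvG P)) =
    (List.range 7).map (pvG (P ++ L)) := by
  induction L with
  | nil => intro P; simp
  | cons a L ih =>
    intro P
    rw [List.foldl_cons, pvStep_eq, ih (P ++ [a])]
    simp

lemma pvBuckets_spec (L : List (String × Int)) :
    L.foldl (fun bs pc =>
        bs.set (pvRank pc.1) (bs.getD (pvRank pc.1) [] ++ [pvFmt pc.1 pc.2]))
      (List.replicate 7 []) =
    (List.range 7).map (pvG L) := by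
  have h0 : (List.replicate 7 ([] : List String)) = (List.range 7).map (pvG []) := by
    rfl
  rw [h0]
  simpa using pvBuckets_go L []

-- per-key filter = dict lookup, under nodup keys
lemma pvFilter_key (L : List (String × Int)) (h : (L.map Prod.fst).Nodup) (k : String) :
    (L.filter (fun pc => pc.1 == k)).map (fun pc => pvFmt pc.1 pc.2) = pvOptB L k := by
  induction L with
  | nil => rfl
  | cons a L ih =>
    obtain ⟨a1, a2⟩ := a
    simp only [List.map_cons, List.nodup_cons] at h
    by_cases hak : a1 = k
    · have hnil : L.filter (fun pc => pc.1 == k) = [] := by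
        apply List.filter_eq_nil_iff.mpr
        intro pc hpc
        have : pc.1 ∈ L.map Prod.fst := List.mem_map_of_mem hpc
        simp only [beq_iff_eq]
        intro he; exact h.1 (by rw [hak, ← he]; exact this)
      have hg : pvOptB ((a1, a2) :: L) k = [pvFmt k a2] := by
        simp [pvOptB, PySem.Dict.get?_mk_cons, hak]
      rw [hg]
      simp [hak, hnil]
    · have hg : pvOptB ((a1, a2) :: L) k = pvOptB L k := by
        simp [pvOptB, PySem.Dict.get?_mk_cons, hak]
      rw [hg, ← ih h.2]
      simp [hak]

-- one step of A's priority loop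
lemma pvStepA (L : List (String × Int)) (acc : List String) (k : String) :
    (match PySem.Dict.get? (PySem.Dict.mk L) k with
     | some c => acc ++ [pvFmt k c]
     | none => acc) = acc ++ pvOptB L k := by
  cases hg : PySem.Dict.get? (PySem.Dict.mk L) k <;> simp [pvOptB, hg]

-- A's first loop, computed over the six literal priorities
lemma pvLoopA (L : List (String × Int)) :
    pvPriority.foldl (fun acc proto =>
      match PySem.Dict.get? (PySem.Dict.mk L) proto with
      | some c => acc ++ [pvFmt proto c]
      | none => acc) [] =
    pvOptB L "VLESS" ++ pvOptB L "VMess" ++ pvOptB L "Trojan" ++ pvOptB L "SS"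
      ++ pvOptB L "Hysteria" ++ pvOptB L "Other" := by
  simp only [pvPriority, List.foldl_cons, List.foldl_nil, pvStepA, List.nil_append]

-- for r < 6, "rank = r" is "key = priority[r]"
lemma pvFilter_rank (L : List (String × Int)) (r : Nat) (k : String)
    (hk : pvPriority.getD r "" = k) (hr : r < 6) :
    L.filter (fun pc => pvRank pc.1 == r) = L.filter (fun pc => pc.1 == k) := by
  apply List.filter_congr
  intro pc _
  obtain ⟨p, c⟩ := pc
  subst hk
  interval_cases r <;> rw [pvRank_eq] <;>
    simp only [pvPriority, List.getD] <;> split_ifs <;> simp_all [@eq_comm String]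

-- ===== VERDICT (by name: the statement is the Claim_ definition above) =====
theorem format_protocols_badge_spec : Claim_equal_format_protocols_badge := by
  intro L _ hpre
  unfold Spec_format_protocols_badge format_protocols_badge format_protocols_badge_alt
  by_cases hL : L.isEmpty
  · simp [hL]
  · simp only [hL, if_false, Bool.false_eq_true]
    rw [pvBuckets_spec]
    congr 1
    -- A's loops: priority lookups, then the leftover filter
    rw [pvLoopA, PySem.List.foldl_append_if]
    -- B's buckets, flattened
    have h7 : List.range 7 = [0, 1, 2, 3, 4, 5, 6] := by rfl
    rw [h7]
    simp only [List.map_cons, List.map_nil, List.flatten_cons, List.flatten_nil,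
      List.append_nil]
    -- identify each bucket
    have hb : ∀ r k, pvPriority.getD r "" = k → r < 6 → pvG L r = pvOptB L k := by
      intro r k hk hr
      rw [pvG, pvFilter_rank L r k hk hr, pvFilter_key L hpre k]
    rw [hb 0 "VLESS" rfl (by omega), hb 1 "VMess" rfl (by omega),
        hb 2 "Trojan" rfl (by omega), hb 3 "SS" rfl (by omega),
        hb 4 "Hysteria" rfl (by omega), hb 5 "Other" rfl (by omega)]
    have h6 : pvG L 6 = (L.filter (fun pc => !(pvPriority.contains pc.1))).map
        (fun pc => pvFmt pc.1 pc.2) := by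
      unfold pvG
      congr 1
      apply List.filter_congr
      intro pc _
      exact pvRank_beq_six pc.1
    rw [h6]
    simp only [List.append_assoc]
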